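-- pv_equiv track=rewrite | github.com/itsali10/minecraft2d | minecraft2d.py | add_block_to_hotbar
-- ===== SOURCE A (Python) =====
-- def add_block_to_hotbar(hotbar_items, block_type):
--     # First try to find a slot with the same block type
--     for i, item in enumerate(hotbar_items):
--         if item is not None and item[0] == block_type:
--             current_type, current_count = item
--             hotbar_items[i] = (block_type, current_count + 1)
--             return True
--
--     # If no matching slot, find an empty slot
--     for i, item in enumerate(hotbar_items):
--         if item is None:
--             hotbar_items[i] = (block_type, 1)
--             return True
--
--     return False
-- ===== SOURCE B (Python) =====
-- def add_block_to_hotbar(hotbar_items, block_type):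
--     empty_index = None
--     for i, item in enumerate(hotbar_items):
--         if item is not None:
--             if item[0] == block_type:
--                 hotbar_items[i] = (block_type, item[1] + 1)
--                 return True
--         elif empty_index is None:
--             empty_index = i
--     if empty_index is not None:
--         hotbar_items[empty_index] = (block_type, 1)
--         return True
--     return False
-- ===== Notes on version B (the rewrite author's own statement) =====
-- stated objective: alternative
-- what changed: Replaces A's two separate scans (match scan, then empty-slot scan) with a single pass that maintains the first empty-slot index as accumulator state and falls back to it after the loop.
import Mathlib
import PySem

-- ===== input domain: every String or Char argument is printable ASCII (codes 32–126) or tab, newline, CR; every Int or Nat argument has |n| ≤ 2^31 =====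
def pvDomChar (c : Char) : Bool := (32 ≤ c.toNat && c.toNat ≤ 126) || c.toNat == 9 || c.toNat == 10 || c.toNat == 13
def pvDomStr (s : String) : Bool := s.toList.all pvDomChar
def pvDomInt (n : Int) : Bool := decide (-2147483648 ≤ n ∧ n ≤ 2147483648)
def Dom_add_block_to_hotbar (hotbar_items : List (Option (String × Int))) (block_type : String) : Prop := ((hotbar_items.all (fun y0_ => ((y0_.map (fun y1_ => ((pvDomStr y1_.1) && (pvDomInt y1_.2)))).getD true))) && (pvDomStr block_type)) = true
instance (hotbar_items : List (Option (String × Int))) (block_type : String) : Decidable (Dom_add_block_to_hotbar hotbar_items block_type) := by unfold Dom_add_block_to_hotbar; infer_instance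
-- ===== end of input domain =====

-- B: one pass keeping the first empty-slot index instead of A's two separate scans (alternative decomposition).
-- Both Pythons mutate hotbar_items in place identically; the equivalence proved here is about the RETURN value only.
-- ===== PORT A =====
-- first loop of A: scan for a slot with the same block type
def pvFindMatchA (hotbar_items : List (Option (String × Int))) (block_type : String) : Bool :=
  match hotbar_items with
  | [] => false
  | item :: rest =>
    match item with
    | some (t, _) => if t == block_type then true else pvFindMatchA rest block_type
    | none => pvFindMatchA rest block_type

-- second loop of A: scan for an empty slot
def pvFindEmptyA (hotbar_items : List (Option (String × Int))) : Bool :=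
  match hotbar_items with
  | [] => false
  | item :: rest =>
    match item with
    | none => true
    | some _ => pvFindEmptyA rest

def add_block_to_hotbar (hotbar_items : List (Option (String × Int))) (block_type : String) : Bool :=
  if pvFindMatchA hotbar_items block_type then true
  else if pvFindEmptyA hotbar_items then true
  else false

-- ===== PORT B =====
-- B's single loop: i is the enumerate counter, emptyIndex the recorded first empty slot
def pvLoopB (hotbar_items : List (Option (String × Int))) (block_type : String)
    (i : Int) (emptyIndex : Option Int) : Bool :=
  match hotbar_items with
  | [] => if emptyIndex.isSome then true else false
  | item :: rest =>
    match item with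
    | some (t, _) =>
      if t == block_type then true
      else pvLoopB rest block_type (i + 1) emptyIndex
    | none =>
      pvLoopB rest block_type (i + 1) (if emptyIndex.isNone then some i else emptyIndex)

def add_block_to_hotbar_alt (hotbar_items : List (Option (String × Int))) (block_type : String) : Bool :=
  pvLoopB hotbar_items block_type 0 none

-- ===== PRECONDITION & SPEC =====
def Spec_add_block_to_hotbar (hotbar_items : List (Option (String × Int))) (block_type : String) (out : Bool) : Prop := out = add_block_to_hotbar_alt hotbar_items block_type
instance (hotbar_items : List (Option (String × Int))) (block_type : String) (out : Bool) : Decidable (Spec_add_block_to_hotbar hotbar_items block_type out) := by unfold Spec_add_block_to_hotbar; infer_instance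

-- ===== CLAIM (what is proved, stated in full; the proofs are below) =====
def Claim_equal_add_block_to_hotbar : Prop := ∀ (hotbar_items : List (Option (String × Int))) (block_type : String), Dom_add_block_to_hotbar hotbar_items block_type → Spec_add_block_to_hotbar hotbar_items block_type (add_block_to_hotbar hotbar_items block_type)

-- ===== LEMMAS AND PROOFS =====

-- ===== VERDICT (by name: the statement is the Claim_ definition above) =====
-- loop invariant: B's single pass returns true iff a matching slot or (a recorded or future) empty slot exists
theorem pvLoopB_eq (hotbar_items : List (Option (String × Int))) (block_type : String)
    (i : Int) (e : Option Int) :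
    pvLoopB hotbar_items block_type i e =
      (pvFindMatchA hotbar_items block_type || e.isSome || pvFindEmptyA hotbar_items) := by
  induction hotbar_items generalizing i e with
  | nil => simp [pvLoopB, pvFindMatchA, pvFindEmptyA]
  | cons item rest ih =>
    cases item with
    | none =>
      simp only [pvLoopB, pvFindMatchA, pvFindEmptyA, ih]
      cases e <;> simp
    | some p =>
      obtain ⟨t, c⟩ := p
      simp only [pvLoopB, pvFindMatchA, pvFindEmptyA, ih]
      by_cases h : t == block_type <;> simp [h]

theorem add_block_to_hotbar_spec : Claim_equal_add_block_to_hotbar := by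
  intro hotbar_items block_type _
  unfold Spec_add_block_to_hotbar add_block_to_hotbar add_block_to_hotbar_alt
  rw [pvLoopB_eq]
  cases h1 : pvFindMatchA hotbar_items block_type <;>
    cases h2 : pvFindEmptyA hotbar_items <;> simp
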